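-- pv_equiv track=rewrite | github.com/AlexT2594/Machine-Learning-Master-Degree | NaiveBayesClassifier/NB.py | createTrainingSetWithClassifySet
-- ===== SOURCE A (Python) =====
-- def createTrainingSetWithClassifySet(kSets):
--     table = []
--     for i in range(len(kSets)):
--         classifySet = kSets[i]
--         trainingSet = []
--         for j in range(len(kSets)):
--             if(i == j):
--                 continue
--             trainingSet.extend(kSets[j])
--         table.append([])
--         table[i].append(classifySet)
--         table[i].append(trainingSet)
--
--     return table
-- ===== SOURCE B (Python) =====
-- def createTrainingSetWithClassifySet(kSets):
--     # prefix/suffix concatenation: no inner loop over all blocks per i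
--     suffixes = [[]]
--     for blk in reversed(kSets):
--         suffixes.append(blk + suffixes[-1])
--     suffixes.reverse()  # suffixes[i] == concatenation of kSets[i:]
--     table = []
--     prefix = []
--     for i, blk in enumerate(kSets):
--         table.append([blk, prefix + suffixes[i + 1]])
--         prefix = prefix + blk
--     return table
-- ===== Notes on version B (the rewrite author's own statement) =====
-- stated objective: alternative
-- what changed: Replaces the quadratic-in-k nested scan (for each i, re-walk all blocks skipping i) by a prefix/suffix decomposition: one backward pass builds all suffix concatenations, then a single forward pass with a running prefix forms each training set as prefix + suffix.
import Mathlib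
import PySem

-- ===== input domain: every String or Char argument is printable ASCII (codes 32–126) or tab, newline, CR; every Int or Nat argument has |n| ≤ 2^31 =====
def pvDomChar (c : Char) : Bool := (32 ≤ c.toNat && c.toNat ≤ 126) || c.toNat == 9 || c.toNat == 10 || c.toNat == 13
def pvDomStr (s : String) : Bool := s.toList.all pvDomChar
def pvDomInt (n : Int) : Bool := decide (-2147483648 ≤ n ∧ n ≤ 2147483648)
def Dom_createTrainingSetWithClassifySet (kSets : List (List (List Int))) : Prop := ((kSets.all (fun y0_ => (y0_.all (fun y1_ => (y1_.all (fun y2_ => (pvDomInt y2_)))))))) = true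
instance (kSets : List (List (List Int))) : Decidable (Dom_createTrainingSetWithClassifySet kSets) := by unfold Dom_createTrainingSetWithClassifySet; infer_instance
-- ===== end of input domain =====

-- B replaces A's nested skip-one scan by a suffix-concatenation pass plus a running prefix (alternative decomposition, same asymptotic cost).

-- ===== PORT A =====
def createTrainingSetWithClassifySet (kSets : List (List (List Int))) : List (List (List (List Int))) :=
  (List.range kSets.length).foldl (fun table i =>
    let classifySet := kSets.getD i []
    let trainingSet := (List.range kSets.length).foldl
      (fun trainingSet j => if i = j then trainingSet else trainingSet ++ kSets.getD j []) []
    table ++ [[classifySet, trainingSet]]) []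

-- ===== PORT B =====
def createTrainingSetWithClassifySet_alt (kSets : List (List (List Int))) : List (List (List (List Int))) :=
  -- python keeps `suffixes` back-to-front then reverses; the Lean list is maintained
  -- head-first, so python's append/last are cons/head and the final reverse is built in
  let suffixes : List (List (List Int)) :=
    kSets.reverse.foldl (fun acc blk => (blk ++ acc.headD []) :: acc) [[]]
  ((PySem.List.enumerate kSets).foldl
    (fun (st : List (List (List (List Int))) × List (List Int)) p =>
      (st.1 ++ [[p.2, st.2 ++ suffixes.getD (p.1.toNat + 1) []]], st.2 ++ p.2))
    ([], [])).1

-- ===== PRECONDITION & SPEC =====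
def Spec_createTrainingSetWithClassifySet (kSets : List (List (List Int))) (out : List (List (List (List Int)))) : Prop := out = createTrainingSetWithClassifySet_alt kSets
instance (kSets : List (List (List Int))) (out : List (List (List (List Int)))) : Decidable (Spec_createTrainingSetWithClassifySet kSets out) := by unfold Spec_createTrainingSetWithClassifySet; infer_instance

-- ===== CLAIM (what is proved, stated in full; the proofs are below) =====
def Claim_equal_createTrainingSetWithClassifySet : Prop := ∀ (kSets : List (List (List Int))), Dom_createTrainingSetWithClassifySet kSets → Spec_createTrainingSetWithClassifySet kSets (createTrainingSetWithClassifySet kSets)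

-- ===== LEMMAS AND PROOFS =====

-- the common specification: entry i is [kSets[i], concat (take i) ++ concat (drop (i+1))]
def pvSpecRow (ks : List (List (List Int))) (i : Nat) : List (List (List Int)) :=
  [ks.getD i [], (ks.take i).flatten ++ (ks.drop (i + 1)).flatten]

def pvSpec (ks : List (List (List Int))) : List (List (List (List Int))) :=
  (List.range ks.length).map (pvSpecRow ks)

lemma foldl_skip {α : Type} (g : Nat → List α) (i : Nat) :
    ∀ (l : List Nat) (acc : List α),
      l.foldl (fun ts j => if i = j then ts else ts ++ g j) acc
        = acc ++ l.flatMap (fun j => if i = j then [] else g j) := by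
  intro l
  induction l with
  | nil => simp
  | cons j t ih =>
    intro acc
    simp only [List.foldl_cons, List.flatMap_cons]
    by_cases h : i = j
    · subst h; simp [ih]
    · simp [h, ih, List.append_assoc]

lemma flatMap_range_getD {α : Type} (t : List (List α)) :
    (List.range t.length).flatMap (fun j => t[j]?.getD []) = t.flatten := by
  induction t with
  | nil => simp
  | cons b t ih =>
    simp [List.range_succ_eq_map, List.flatMap_map, ih]

lemma flatMap_skip (ks : List (List (List Int))) :
    ∀ (i : Nat), i < ks.length →
      (List.range ks.length).flatMap (fun j => if i = j then [] else ks[j]?.getD [])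
        = (ks.take i).flatten ++ (ks.drop (i + 1)).flatten := by
  induction ks with
  | nil => intro i h; simp at h
  | cons b t ih =>
    intro i h
    cases i with
    | zero =>
      simp only [List.range_succ_eq_map, List.length_cons, List.flatMap_cons, List.flatMap_map]
      simp [flatMap_range_getD]
    | succ i' =>
      have h' : i' < t.length := by simpa using h
      simp only [List.range_succ_eq_map, List.length_cons, List.flatMap_cons, List.flatMap_map]
      simp [ih i' h', List.append_assoc]

lemma portA_eq_spec (ks : List (List (List Int))) :
    createTrainingSetWithClassifySet ks = pvSpec ks := by
  unfold createTrainingSetWithClassifySet pvSpec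
  rw [PySem.List.foldl_append_singleton_eq_map]
  refine (List.nil_append _).trans (List.map_congr_left ?_)
  intro i hi
  rw [List.mem_range] at hi
  simp only [pvSpecRow]
  rw [foldl_skip]
  simp only [List.getD_eq_getElem?_getD]
  rw [flatMap_skip ks i hi]
  simp

-- B's suffix pass computes all suffix concatenations
lemma suffixes_eq (ks : List (List (List Int))) :
    ks.reverse.foldl (fun acc blk => (blk ++ acc.headD []) :: acc) [[]]
      = (List.range (ks.length + 1)).map (fun i => (ks.drop i).flatten) := by
  rw [List.foldl_reverse]
  induction ks with
  | nil => simp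
  | cons b t ih =>
    rw [List.foldr_cons, ih]
    have hhead : ((List.range (t.length + 1)).map (fun i => (t.drop i).flatten)).headD [] = t.flatten := by
      rw [List.range_succ_eq_map]; simp
    rw [hhead]
    simp only [List.length_cons]
    rw [List.range_succ_eq_map (n := t.length + 1)]
    simp [List.flatMap_map]

lemma altfold (ks : List (List (List Int)))
    (suffixes : List (List (List Int)))
    (hsuf : suffixes = (List.range (ks.length + 1)).map (fun i => (ks.drop i).flatten)) :
    ∀ (t : List (List (List Int))) (s : Nat) (table : List (List (List (List Int))))
      (pre : List (List Int)),
      ks.drop s = t → pre = (ks.take s).flatten →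
      ((PySem.List.enumerate t (s : Int)).foldl
        (fun (st : List (List (List (List Int))) × List (List Int)) p =>
          (st.1 ++ [[p.2, st.2 ++ suffixes.getD (p.1.toNat + 1) []]], st.2 ++ p.2))
        (table, pre)).1
      = table ++ (List.range' s t.length).map (pvSpecRow ks) := by
  intro t
  induction t with
  | nil => intro s table pre _ _; simp [PySem.List.enumerate]
  | cons b t' ih =>
    intro s table pre hdrop hpre
    have hs : s < ks.length := by
      by_contra h
      rw [List.drop_eq_nil_of_le (Nat.le_of_not_lt h)] at hdrop
      exact List.cons_ne_nil _ _ hdrop.symm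
    have hget : ks[s]? = some b := by rw [← List.head?_drop, hdrop]; rfl
    have hdrop' : ks.drop (s + 1) = t' := by rw [← List.tail_drop, hdrop]; rfl
    have hlt : s + 1 < ks.length + 1 := by omega
    have hsufget : suffixes.getD (s + 1) [] = t'.flatten := by
      simp [hsuf, List.getD_eq_getElem?_getD, hlt, hdrop']
    have hpre' : (ks.take (s + 1)).flatten = pre ++ b := by
      rw [List.take_add_one, hget, hpre]; simp
    rw [PySem.List.enumerate_cons, List.foldl_cons]
    simp only [Int.toNat_natCast]
    have hc : (s : Int) + 1 = ((s + 1 : Nat) : Int) := by push_cast; ring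
    rw [hc, ih (s + 1) _ _ hdrop' hpre'.symm]
    simp only [List.length_cons, List.range'_succ, List.map_cons]
    simp only [List.getD_eq_getElem?_getD] at hsufget
    simp [pvSpecRow, List.getD_eq_getElem?_getD, hget, hsufget, hdrop', hpre, List.append_assoc]

lemma portB_eq_spec (ks : List (List (List Int))) :
    createTrainingSetWithClassifySet_alt ks = pvSpec ks := by
  unfold createTrainingSetWithClassifySet_alt pvSpec
  rw [show ((0 : Int)) = ((0 : Nat) : Int) from rfl] at *
  have := altfold ks _ (suffixes_eq ks) ks 0 [] [] (by simp) (by simp)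
  simpa [List.range_eq_range'] using this

-- ===== VERDICT (by name: the statement is the Claim_ definition above) =====
theorem createTrainingSetWithClassifySet_spec : Claim_equal_createTrainingSetWithClassifySet := by
  intro ks _
  unfold Spec_createTrainingSetWithClassifySet
  rw [portA_eq_spec, portB_eq_spec]
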